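-- pv_equiv track=rewrite | github.com/edeleu/iqhe-simulation | precompute.py | precompute_n_PBC
-- ===== SOURCE A (Python) =====
-- def precompute_n_PBC(N, size):
--     lookup_table = {}
--
--     for j in range(N):  # Loop through all values of j
--         for k in range(N):  # Loop through all values of k
--             valid_n = []  # List to store valid n for the current (j, k)
--
--             for n in range(-size, size + 1):  # Loop through the range of n
--                 # Compute modulus and check if it equals 0... Delta function!
--                 modulus = (j - (k - n)) % N
--                 if modulus == 0:
--                     valid_n.append(n)
--
--             lookup_table[(j, k)] = valid_n  # Store the valid n values for (j, k)
--
--     return lookup_table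
-- ===== SOURCE B (Python) =====
-- def precompute_n_PBC(N, size):
--     # Precompute one step-N range per residue class r = (k - j + size) % N,
--     # then share these N lists across all N^2 keys via a dict comprehension.
--     residue_lists = [list(range(-size + r, size + 1, N)) for r in range(N)]
--     return {(j, k): residue_lists[(k - j + size) % N]
--             for j in range(N) for k in range(N)}
-- ===== Notes on version B (the rewrite author's own statement) =====
-- stated objective: faster
-- what changed: B precomputes the N arithmetic progressions n ≡ r (mod N) in [-size,size] once (one step-N range per residue class) and fills the table with a dict comprehension that merely looks up the shared list for residue (k-j+size)%N, instead of A's per-(j,k) scan of every n in [-size,size].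
import Mathlib
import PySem

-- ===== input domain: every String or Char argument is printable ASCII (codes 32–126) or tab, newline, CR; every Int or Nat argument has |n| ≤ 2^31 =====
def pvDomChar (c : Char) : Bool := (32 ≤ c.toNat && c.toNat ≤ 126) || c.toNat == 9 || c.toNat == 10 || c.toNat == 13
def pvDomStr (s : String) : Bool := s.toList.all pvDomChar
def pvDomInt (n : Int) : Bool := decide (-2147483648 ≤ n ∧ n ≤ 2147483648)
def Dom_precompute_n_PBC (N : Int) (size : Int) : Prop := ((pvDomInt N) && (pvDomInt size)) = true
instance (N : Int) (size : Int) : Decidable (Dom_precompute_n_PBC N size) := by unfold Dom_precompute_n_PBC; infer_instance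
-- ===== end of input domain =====

-- Header: B precomputes the N residue-class progressions once and fills the table
-- by lookup, replacing A's per-(j,k) scan of all n in [-size,size] (faster: asymptotic).
-- ===== PORT A =====
def precompute_n_PBC (N : Int) (size : Int) : List (Int × Int × List Int) :=
  -- lookup_table = {}; for j in range(N): for k in range(N):
  --   valid_n = []; for n in range(-size, size+1): if (j-(k-n)) % N == 0: valid_n.append(n)
  --   lookup_table[(j,k)] = valid_n
  -- keys (j,k) are all distinct, so each dict store appends a fresh entry in insertion order
  (PySem.List.pyRange 0 N 1).foldl (fun lookup_table j =>
    (PySem.List.pyRange 0 N 1).foldl (fun lookup_table k =>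
      lookup_table ++ [(j, k,
        (PySem.List.pyRange (-size) (size + 1) 1).foldl (fun valid_n n =>
          if PySem.Int.mod (j - (k - n)) N == 0 then valid_n ++ [n] else valid_n) [])])
      lookup_table) []

-- ===== PORT B =====
def precompute_n_PBC_alt (N : Int) (size : Int) : List (Int × Int × List Int) :=
  -- residue_lists = [list(range(-size + r, size + 1, N)) for r in range(N)]
  -- {(j,k): residue_lists[(k-j+size) % N] for j in range(N) for k in range(N)}
  -- the index (k-j+size) % N is always in range [0,N), so pyGetD's default [] is never used
  let residue_lists :=
    (PySem.List.pyRange 0 N 1).map (fun r => PySem.List.pyRange (-size + r) (size + 1) N)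
  (PySem.List.pyRange 0 N 1).flatMap (fun j =>
    (PySem.List.pyRange 0 N 1).map (fun k =>
      (j, k, PySem.List.pyGetD residue_lists (PySem.Int.mod (k - j + size) N) [])))

-- ===== PRECONDITION & SPEC =====
def Spec_precompute_n_PBC (N : Int) (size : Int) (out : List (Int × Int × List Int)) : Prop := out = precompute_n_PBC_alt N size
instance (N : Int) (size : Int) (out : List (Int × Int × List Int)) : Decidable (Spec_precompute_n_PBC N size out) := by unfold Spec_precompute_n_PBC; infer_instance

-- ===== CLAIM (what is proved, stated in full; the proofs are below) =====
def Claim_equal_precompute_n_PBC : Prop := ∀ (N : Int) (size : Int), Dom_precompute_n_PBC N size → Spec_precompute_n_PBC N size (precompute_n_PBC N size)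

-- ===== LEMMAS AND PROOFS =====

lemma pairwise_lt_pyRange_pos (a b s : Int) (hs : 0 < s) :
    List.Pairwise (· < ·) (PySem.List.pyRange a b s) := by
  rw [PySem.List.pyRange_of_pos a b hs]
  refine List.Pairwise.map _ (fun x y hxy => ?_) List.pairwise_lt_range
  have : (x : Int) < (y : Int) := by exact_mod_cast hxy
  nlinarith

-- A's filtered scan over [-size, size] is exactly the step-N range starting at the
-- first n ≥ -size with n ≡ k-j (mod N)
lemma inner_eq (N j k size : Int) (hN : 0 < N) :
    List.filter (fun n => PySem.Int.mod (j - (k - n)) N == 0)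
      (PySem.List.pyRange (-size) (size + 1) 1)
    = PySem.List.pyRange (-size + PySem.Int.mod (k - j + size) N) (size + 1) N := by
  set r := PySem.Int.mod (k - j + size) N with hr
  have hr0 : 0 ≤ r := PySem.Int.mod_nonneg _ hN
  have hrN : r < N := PySem.Int.mod_lt _ hN
  have hdq : N ∣ (k - j + size) - r := by
    refine ⟨PySem.Int.floordiv (k - j + size) N, ?_⟩
    have := PySem.Int.floordiv_mul_add_mod (k - j + size) N
    linarith [this]
  have hpw1 : List.Pairwise (· < ·)
      (List.filter (fun n => PySem.Int.mod (j - (k - n)) N == 0)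
        (PySem.List.pyRange (-size) (size + 1) 1)) :=
    (PySem.List.pairwise_lt_pyRange_one _ _).filter _
  have hpw2 := pairwise_lt_pyRange_pos (-size + r) (size + 1) N hN
  have hmem : ∀ x : Int,
      x ∈ List.filter (fun n => PySem.Int.mod (j - (k - n)) N == 0)
        (PySem.List.pyRange (-size) (size + 1) 1) ↔
      x ∈ PySem.List.pyRange (-size + r) (size + 1) N := by
    intro x
    rw [List.mem_filter, PySem.List.mem_pyRange_one,
        PySem.List.mem_pyRange_iff_of_pos hN]
    have hb : (PySem.Int.mod (j - (k - x)) N == 0) = true ↔ N ∣ (j - (k - x)) := by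
      rw [beq_iff_eq, PySem.Int.mod_eq_zero_iff_dvd]
    constructor
    · rintro ⟨⟨h1, h2⟩, hd⟩
      rw [hb] at hd
      have hdx : N ∣ x - (-size + r) := by
        have : x - (-size + r) = (j - (k - x)) + ((k - j + size) - r) := by ring
        rw [this]; exact dvd_add hd hdq
      refine ⟨?_, h2, hdx⟩
      by_contra hlt
      push Not at hlt
      have hpos : 0 < (-size + r) - x := by linarith
      have hdvd : N ∣ (-size + r) - x := by
        rw [show (-size + r) - x = -(x - (-size + r)) by ring]
        exact dvd_neg.mpr hdx
      have := Int.le_of_dvd hpos hdvd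
      omega
    · rintro ⟨h1, h2, hd⟩
      have hdd : N ∣ (j - (k - x)) := by
        have : j - (k - x) = (x - (-size + r)) - ((k - j + size) - r) := by ring
        rw [this]; exact dvd_sub hd hdq
      exact ⟨⟨by linarith, h2⟩, hb.mpr hdd⟩
  have hperm : (List.filter (fun n => PySem.Int.mod (j - (k - n)) N == 0)
        (PySem.List.pyRange (-size) (size + 1) 1)).Perm
      (PySem.List.pyRange (-size + r) (size + 1) N) := by
    rw [List.perm_ext_iff_of_nodup
      ((PySem.List.nodup_pyRange_one _ _).filter _)
      (hpw2.imp ne_of_lt)]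
    exact hmem
  exact List.Perm.eq_of_pairwise
    (fun a b _ _ hab hba => absurd hab (not_lt.mpr (le_of_lt hba))) hpw1 hpw2 hperm

-- ===== VERDICT (by name: the statement is the Claim_ definition above) =====
theorem precompute_n_PBC_spec : Claim_equal_precompute_n_PBC := by
  intro N size _
  unfold Spec_precompute_n_PBC precompute_n_PBC precompute_n_PBC_alt
  -- flatten A's nested appending folds into a flatMap of a map
  have hA : ∀ (acc : List (Int × Int × List Int)) (j : Int),
      (PySem.List.pyRange 0 N 1).foldl (fun lookup_table k =>
        lookup_table ++ [(j, k,
          (PySem.List.pyRange (-size) (size + 1) 1).foldl (fun valid_n n =>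
            if PySem.Int.mod (j - (k - n)) N == 0 then valid_n ++ [n] else valid_n) [])]) acc
      = acc ++ (PySem.List.pyRange 0 N 1).map (fun k => (j, k,
          (PySem.List.pyRange (-size) (size + 1) 1).foldl (fun valid_n n =>
            if PySem.Int.mod (j - (k - n)) N == 0 then valid_n ++ [n] else valid_n) [])) :=
    fun acc j => PySem.List.foldl_append_singleton_eq_map _ _ _
  simp only [hA]
  rw [PySem.List.foldl_append_eq_flatMap]
  simp only [List.nil_append, List.flatMap_def]
  congr 1
  refine List.map_congr_left (fun j hj => ?_)
  refine List.map_congr_left (fun k hk => ?_)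
  have hN : 0 < N := by
    have := PySem.List.mem_pyRange_one.mp hj; omega
  have hr0 : 0 ≤ PySem.Int.mod (k - j + size) N := PySem.Int.mod_nonneg _ hN
  have hrN : PySem.Int.mod (k - j + size) N < N := PySem.Int.mod_lt _ hN
  rw [PySem.List.foldl_append_if (fun n => PySem.Int.mod (j - (k - n)) N == 0) (fun n => n)]
  simp only [List.map_id_fun', List.nil_append, id]
  rw [inner_eq N j k size hN,
      PySem.List.pyGetD_map_pyRange_of_nonneg _ N _ _ hr0 hrN]
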